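-- pv_equiv track=rewrite | github.com/MaxPowerScience/EnglishSentiment | src/extractRawData.py | sort_text_by_sentiment
-- ===== SOURCE A (Python) =====
-- def sort_text_by_sentiment(texts, sentiments):
--     sorted_positive_texts, sorted_negative_texts, sorted_neutral_texts = [], [], []
--     sorted_positive_sentiment, sorted_negative_sentiment, sorted_neutral_sentiment = [], [], []
--
--     for idx, text in enumerate(texts):
--         if sentiments[idx] == 'positive':
--             sorted_positive_texts.append(text)
--             sorted_positive_sentiment.append(sentiments[idx])
--         elif sentiments[idx] == 'negative':
--             sorted_negative_texts.append(text)
--             sorted_negative_sentiment.append(sentiments[idx])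
--         else:
--             sorted_neutral_texts.append(text)
--             sorted_neutral_sentiment.append(sentiments[idx])
--
--     sorted_texts = sorted_positive_texts + sorted_negative_texts + sorted_neutral_texts
--     sorted_sentiments = sorted_positive_sentiment + sorted_negative_sentiment + sorted_neutral_sentiment
--
--     return sorted_texts, sorted_positive_texts, sorted_negative_sentiment, sorted_neutral_texts, sorted_sentiments
-- ===== SOURCE B (Python) =====
-- def sort_text_by_sentiment(texts, sentiments):
--     ordered = sorted(zip(texts, sentiments),
--                      key=lambda p: 0 if p[1] == 'positive' else 1 if p[1] == 'negative' else 2)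
--     ts = [t for t, _ in ordered]
--     ss = [s for _, s in ordered]
--     n0 = sum(s == 'positive' for s in ss)
--     n1 = sum(s == 'negative' for s in ss)
--     return ts, ts[:n0], ss[n0:n0 + n1], ts[n0 + n1:], ss
-- ===== Notes on version B (the rewrite author's own statement) =====
-- stated objective: alternative
-- what changed: Replaces A's single 3-way bucketing loop over six accumulator lists with a stable sort of the zipped (text, sentiment) pairs under a positive<negative<neutral rank key, recovering the per-category lists afterwards by counting and slicing the sorted arrays.
import Mathlib
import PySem

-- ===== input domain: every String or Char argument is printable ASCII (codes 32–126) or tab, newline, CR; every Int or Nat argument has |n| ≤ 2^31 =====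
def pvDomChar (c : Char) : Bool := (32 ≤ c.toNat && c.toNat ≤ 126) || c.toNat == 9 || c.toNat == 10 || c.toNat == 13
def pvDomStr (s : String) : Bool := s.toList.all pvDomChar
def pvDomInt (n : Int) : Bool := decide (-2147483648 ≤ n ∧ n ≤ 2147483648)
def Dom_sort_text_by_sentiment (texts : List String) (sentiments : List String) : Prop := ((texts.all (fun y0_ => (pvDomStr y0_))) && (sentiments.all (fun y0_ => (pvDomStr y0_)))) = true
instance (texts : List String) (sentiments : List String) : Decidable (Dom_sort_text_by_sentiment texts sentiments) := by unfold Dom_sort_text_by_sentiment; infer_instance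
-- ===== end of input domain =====

-- B: stable sort of the zipped pairs by a positive<negative<neutral rank key, then count + slice, instead of A's 3-way bucketing loop (alternative algorithm; return value proved equal whenever sentiments is at least as long as texts).


-- ===== PORT A =====
-- A's loop body: state = (posT, posS, negT, negS, neuT, neuS); where Python raises IndexError
-- (sentiments[idx] out of range) PySem.List.pyGet? is none and the step is a no-op — those
-- inputs are exactly the ones excluded by Pre_.
def pvStepA (sentiments : List String)
    (acc : List String × List String × List String × List String × List String × List String)
    (p : Int × String) :
    List String × List String × List String × List String × List String × List String :=
  match PySem.List.pyGet? sentiments p.1 with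
  | none => acc
  | some s =>
    if s = "positive" then
      (acc.1 ++ [p.2], acc.2.1 ++ [s], acc.2.2.1, acc.2.2.2.1, acc.2.2.2.2.1, acc.2.2.2.2.2)
    else if s = "negative" then
      (acc.1, acc.2.1, acc.2.2.1 ++ [p.2], acc.2.2.2.1 ++ [s], acc.2.2.2.2.1, acc.2.2.2.2.2)
    else
      (acc.1, acc.2.1, acc.2.2.1, acc.2.2.2.1, acc.2.2.2.2.1 ++ [p.2], acc.2.2.2.2.2 ++ [s])

def sort_text_by_sentiment (texts : List String) (sentiments : List String) :
    List String × List String × List String × List String × List String :=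
  let st := (PySem.List.enumerate texts).foldl (pvStepA sentiments) ([], [], [], [], [], [])
  (st.1 ++ st.2.2.1 ++ st.2.2.2.2.1, st.1, st.2.2.2.1, st.2.2.2.2.1,
   st.2.1 ++ st.2.2.2.1 ++ st.2.2.2.2.2)

-- ===== PORT B =====
-- B's sort key: 0 if p[1]=='positive' else 1 if p[1]=='negative' else 2
def pvKey (p : String × String) : Int :=
  if p.2 = "positive" then 0 else if p.2 = "negative" then 1 else 2

def sort_text_by_sentiment_alt (texts : List String) (sentiments : List String) :
    List String × List String × List String × List String × List String :=
  let ordered := PySem.List.sorted (texts.zip sentiments) pvKey false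
  let ts := ordered.map Prod.fst
  let ss := ordered.map Prod.snd
  let n0 : Int := (ss.countP (fun s => s == "positive") : Int)
  let n1 : Int := (ss.countP (fun s => s == "negative") : Int)
  (ts, PySem.List.slice ts none (some n0),
   PySem.List.slice ss (some n0) (some (n0 + n1)),
   PySem.List.slice ts (some (n0 + n1)) none, ss)

-- ===== PRECONDITION & SPEC =====
-- A raises IndexError (sentiments[idx]) as soon as texts is longer than sentiments; Pre_ is exactly the inputs where A returns.
def Pre_sort_text_by_sentiment (texts : List String) (sentiments : List String) : Prop :=
  texts.length ≤ sentiments.length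
instance (texts : List String) (sentiments : List String) : Decidable (Pre_sort_text_by_sentiment texts sentiments) := by unfold Pre_sort_text_by_sentiment; infer_instance
def pvWitness_sort_text_by_sentiment : List String × List String :=
  (["good", "bad", "meh"], ["positive", "negative", "neutral"])

def Spec_sort_text_by_sentiment (texts : List String) (sentiments : List String) (out : List String × List String × List String × List String × List String) : Prop := out = sort_text_by_sentiment_alt texts sentiments
instance (texts : List String) (sentiments : List String) (out : List String × List String × List String × List String × List String) : Decidable (Spec_sort_text_by_sentiment texts sentiments out) := by unfold Spec_sort_text_by_sentiment; infer_instance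

-- ===== CLAIM (what is proved, stated in full; the proofs are below) =====
def Claim_equal_sort_text_by_sentiment : Prop := ∀ (texts : List String) (sentiments : List String), Dom_sort_text_by_sentiment texts sentiments → Pre_sort_text_by_sentiment texts sentiments → Spec_sort_text_by_sentiment texts sentiments (sort_text_by_sentiment texts sentiments)

-- ===== LEMMAS AND PROOFS =====

-- A's step specialised to the aligned pair (text, sentiment) once the index lookup has succeeded.
def pvStepZ (acc : List String × List String × List String × List String × List String × List String)
    (p : String × String) :
    List String × List String × List String × List String × List String × List String :=
  if p.2 = "positive" then
    (acc.1 ++ [p.1], acc.2.1 ++ [p.2], acc.2.2.1, acc.2.2.2.1, acc.2.2.2.2.1, acc.2.2.2.2.2)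
  else if p.2 = "negative" then
    (acc.1, acc.2.1, acc.2.2.1 ++ [p.1], acc.2.2.2.1 ++ [p.2], acc.2.2.2.2.1, acc.2.2.2.2.2)
  else
    (acc.1, acc.2.1, acc.2.2.1, acc.2.2.2.1, acc.2.2.2.2.1 ++ [p.1], acc.2.2.2.2.2 ++ [p.2])

def pvF0 (ps : List (String × String)) : List (String × String) := ps.filter (fun p => p.2 == "positive")
def pvF1 (ps : List (String × String)) : List (String × String) := ps.filter (fun p => p.2 == "negative")
def pvF2 (ps : List (String × String)) : List (String × String) := ps.filter (fun p => p.2 != "positive" && p.2 != "negative")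

theorem foldA_eq_foldZ : ∀ (ts pre ss : List String)
    (acc : List String × List String × List String × List String × List String × List String),
    ts.length ≤ ss.length →
    (PySem.List.enumerate ts (pre.length : Int)).foldl (pvStepA (pre ++ ss)) acc
      = (ts.zip ss).foldl pvStepZ acc := by
  intro ts
  induction ts with
  | nil => intro pre ss acc h; simp [PySem.List.enumerate_nil]
  | cons t ts ih =>
    intro pre ss acc h
    match ss with
    | [] => simp at h
    | s :: ss =>
      rw [PySem.List.enumerate_cons]
      simp only [List.zip_cons_cons, List.foldl_cons]
      have hget : PySem.List.pyGet? (pre ++ s :: ss) ((pre.length : Nat) : Int) = some s :=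
        PySem.List.pyGet?_append_length pre ss s
      have hstep : pvStepA (pre ++ s :: ss) acc ((pre.length : Int), t) = pvStepZ acc (t, s) := by
        simp only [pvStepA, pvStepZ, hget]
      rw [hstep]
      have hpre : ((pre ++ [s]).length : Int) = (pre.length : Int) + 1 := by
        simp
      have hsplit : pre ++ s :: ss = (pre ++ [s]) ++ ss := by simp
      rw [← hpre, hsplit]
      exact ih (pre ++ [s]) ss _ (by simpa using Nat.le_of_succ_le_succ h)

theorem foldZ_spec : ∀ (ps : List (String × String))
    (a1 a2 a3 a4 a5 a6 : List String),
    ps.foldl pvStepZ (a1, a2, a3, a4, a5, a6)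
      = (a1 ++ (pvF0 ps).map Prod.fst, a2 ++ (pvF0 ps).map Prod.snd,
         a3 ++ (pvF1 ps).map Prod.fst, a4 ++ (pvF1 ps).map Prod.snd,
         a5 ++ (pvF2 ps).map Prod.fst, a6 ++ (pvF2 ps).map Prod.snd) := by
  intro ps
  induction ps with
  | nil => intro a1 a2 a3 a4 a5 a6; simp [pvF0, pvF1, pvF2]
  | cons p ps ih =>
    intro a1 a2 a3 a4 a5 a6
    simp only [List.foldl_cons, pvStepZ]
    by_cases h1 : p.2 = "positive"
    · simp [h1, ih, pvF0, pvF1, pvF2]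
    · by_cases h2 : p.2 = "negative"
      · simp [h2, ih, pvF0, pvF1, pvF2]
      · simp [h1, h2, ih, pvF0, pvF1, pvF2]

-- insertBy walks past a block no element of which comes after x …
theorem insertBy_skip {α : Type} (before : α → α → Bool) (x : α) :
    ∀ (as bs : List α), (∀ a ∈ as, before x a = false) →
    PySem.List.insertBy before x (as ++ bs) = as ++ PySem.List.insertBy before x bs := by
  intro as
  induction as with
  | nil => intro bs _; simp
  | cons a as ih =>
    intro bs h
    have ha : before x a = false := h a (by simp)
    simp only [List.cons_append, PySem.List.insertBy, ha]
    simp [ih bs (fun a' ha' => h a' (by simp [ha']))]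

-- … and stops in front of a block every element of which does.
theorem insertBy_front {α : Type} (before : α → α → Bool) (x : α) :
    ∀ (ys : List α), (∀ y ∈ ys, before x y = true) →
    PySem.List.insertBy before x ys = x :: ys := by
  intro ys h
  cases ys with
  | nil => simp [PySem.List.insertBy]
  | cons y ys => simp [PySem.List.insertBy, h y (by simp)]

theorem key_cases (p : String × String) : pvKey p = 0 ∨ pvKey p = 1 ∨ pvKey p = 2 := by
  unfold pvKey; split_ifs <;> simp

-- The stable sort under pvKey is exactly the three filters concatenated.
theorem foldl_insertBy_grouped : ∀ (ps : List (String × String))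
    (g0 g1 g2 : List (String × String)),
    (∀ p ∈ g0, pvKey p = 0) → (∀ p ∈ g1, pvKey p = 1) → (∀ p ∈ g2, pvKey p = 2) →
    ps.foldl (fun acc x => PySem.List.insertBy (fun a b => decide (pvKey a < pvKey b)) x acc)
        (g0 ++ g1 ++ g2)
      = (g0 ++ pvF0 ps) ++ (g1 ++ pvF1 ps) ++ (g2 ++ pvF2 ps) := by
  intro ps
  induction ps with
  | nil => intro g0 g1 g2 _ _ _; simp [pvF0, pvF1, pvF2]
  | cons p ps ih =>
    intro g0 g1 g2 h0 h1 h2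
    simp only [List.foldl_cons]
    rcases key_cases p with hk | hk | hk
    · have hp : p.2 = "positive" := by
        unfold pvKey at hk; split_ifs at hk with hc1 hc2 <;> first | exact hc1 | omega
      have hins : PySem.List.insertBy (fun a b => decide (pvKey a < pvKey b)) p (g0 ++ g1 ++ g2)
          = (g0 ++ [p]) ++ g1 ++ g2 := by
        rw [List.append_assoc]
        rw [insertBy_skip _ p g0 (g1 ++ g2) (fun a ha => by simp [h0 a ha, hk])]
        rw [insertBy_front _ p (g1 ++ g2) (fun y hy => by
          rcases List.mem_append.mp hy with hy | hy
          · simp [h1 y hy, hk]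
          · simp [h2 y hy, hk])]
        simp
      rw [hins, ih (g0 ++ [p]) g1 g2
        (fun a ha => by rcases List.mem_append.mp ha with ha | ha
                        · exact h0 a ha
                        · simp at ha; simpa [ha] using hk) h1 h2]
      simp [pvF0, pvF1, pvF2, hp]
    · have hp : p.2 = "negative" := by
        unfold pvKey at hk
        by_cases h1 : p.2 = "positive"
        · simp [h1] at hk
        · by_cases h2 : p.2 = "negative"
          · exact h2
          · simp [h1, h2] at hk
      have hins : PySem.List.insertBy (fun a b => decide (pvKey a < pvKey b)) p (g0 ++ g1 ++ g2)
          = g0 ++ (g1 ++ [p]) ++ g2 := by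
        rw [List.append_assoc]
        rw [insertBy_skip _ p g0 (g1 ++ g2) (fun a ha => by simp [h0 a ha, hk])]
        rw [insertBy_skip _ p g1 g2 (fun a ha => by simp [h1 a ha, hk])]
        rw [insertBy_front _ p g2 (fun y hy => by simp [h2 y hy, hk])]
        simp
      rw [hins, ih g0 (g1 ++ [p]) g2 h0
        (fun a ha => by rcases List.mem_append.mp ha with ha | ha
                        · exact h1 a ha
                        · simp at ha; simpa [ha] using hk) h2]
      simp [pvF0, pvF1, pvF2, hp]
    · have hp1 : p.2 ≠ "positive" := by
        intro h; simp [pvKey, h] at hk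
      have hp2 : p.2 ≠ "negative" := by
        intro h; simp [pvKey, h] at hk
      have hins : PySem.List.insertBy (fun a b => decide (pvKey a < pvKey b)) p (g0 ++ g1 ++ g2)
          = g0 ++ g1 ++ (g2 ++ [p]) := by
        rw [PySem.List.insertBy_of_forall_not_before _ p (g0 ++ g1 ++ g2) (fun y hy => by
          rcases List.mem_append.mp hy with hy | hy
          · rcases List.mem_append.mp hy with hy | hy
            · simp [h0 y hy, hk]
            · simp [h1 y hy, hk]
          · simp [h2 y hy, hk])]
        simp
      rw [hins, ih g0 g1 (g2 ++ [p]) h0 h1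
        (fun a ha => by rcases List.mem_append.mp ha with ha | ha
                        · exact h2 a ha
                        · simp at ha; simpa [ha] using hk)]
      simp [pvF0, pvF1, pvF2, hp1, hp2]

theorem sorted_grouped (ps : List (String × String)) :
    PySem.List.sorted ps pvKey false = pvF0 ps ++ pvF1 ps ++ pvF2 ps := by
  rw [PySem.List.sorted_eq_foldl_insertBy]
  have := foldl_insertBy_grouped ps [] [] []
    (by intro p h; simp at h) (by intro p h; simp at h) (by intro p h; simp at h)
  simpa using this

theorem countP_pos (ps : List (String × String)) :
    ((pvF0 ps ++ pvF1 ps ++ pvF2 ps).map Prod.snd).countP (fun s => s == "positive")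
      = (pvF0 ps).length := by
  simp only [List.map_append, List.countP_append, List.countP_map]
  have h0 : List.countP ((fun s => s == "positive") ∘ Prod.snd) (pvF0 ps) = (pvF0 ps).length :=
    List.countP_eq_length.mpr (fun a ha => by
      have := (List.mem_filter.mp ha).2; simpa [Function.comp] using this)
  have h1 : List.countP ((fun s => s == "positive") ∘ Prod.snd) (pvF1 ps) = 0 :=
    List.countP_eq_zero.mpr (fun a ha => by
      have := (List.mem_filter.mp ha).2
      simp only [beq_iff_eq] at this; simp [Function.comp, this])
  have h2 : List.countP ((fun s => s == "positive") ∘ Prod.snd) (pvF2 ps) = 0 :=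
    List.countP_eq_zero.mpr (fun a ha => by
      have := (List.mem_filter.mp ha).2
      simp only [Bool.and_eq_true, bne_iff_ne] at this
      simp [Function.comp, this.1])
  omega

theorem countP_neg (ps : List (String × String)) :
    ((pvF0 ps ++ pvF1 ps ++ pvF2 ps).map Prod.snd).countP (fun s => s == "negative")
      = (pvF1 ps).length := by
  simp only [List.map_append, List.countP_append, List.countP_map]
  have h0 : List.countP ((fun s => s == "negative") ∘ Prod.snd) (pvF0 ps) = 0 :=
    List.countP_eq_zero.mpr (fun a ha => by
      have := (List.mem_filter.mp ha).2
      simp only [beq_iff_eq] at this; simp [Function.comp, this])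
  have h1 : List.countP ((fun s => s == "negative") ∘ Prod.snd) (pvF1 ps) = (pvF1 ps).length :=
    List.countP_eq_length.mpr (fun a ha => by
      have := (List.mem_filter.mp ha).2; simpa [Function.comp] using this)
  have h2 : List.countP ((fun s => s == "negative") ∘ Prod.snd) (pvF2 ps) = 0 :=
    List.countP_eq_zero.mpr (fun a ha => by
      have := (List.mem_filter.mp ha).2
      simp only [Bool.and_eq_true, bne_iff_ne] at this
      simp [Function.comp, this.2])
  omega

theorem sort_text_by_sentiment_spec : Claim_equal_sort_text_by_sentiment := by
  intro texts sentiments _ hpre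
  unfold Spec_sort_text_by_sentiment
  unfold Pre_sort_text_by_sentiment at hpre
  have h0 : PySem.List.enumerate texts = PySem.List.enumerate texts ((List.length ([] : List String) : Nat) : Int) := by
    simp
  have hA := foldA_eq_foldZ texts [] sentiments ([], [], [], [], [], []) hpre
  simp only [List.nil_append] at hA
  unfold sort_text_by_sentiment sort_text_by_sentiment_alt
  rw [h0, hA, foldZ_spec]
  simp only [List.nil_append]
  set ps := texts.zip sentiments with hps
  rw [sorted_grouped, countP_pos, countP_neg]
  set m0 := (pvF0 ps).map Prod.fst
  set m1 := (pvF1 ps).map Prod.fst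
  set m2 := (pvF2 ps).map Prod.fst
  have hl0 : (pvF0 ps).length = m0.length := by simp [m0]
  have hl1 : (pvF1 ps).length = m1.length := by simp [m1]
  have hmap : (pvF0 ps ++ pvF1 ps ++ pvF2 ps).map Prod.fst = m0 ++ m1 ++ m2 := by
    simp [m0, m1, m2]
  have hcast : ((pvF0 ps).length : Int) + ((pvF1 ps).length : Int)
      = (((pvF0 ps).length + (pvF1 ps).length : Nat) : Int) := by push_cast; ring
  simp only [hmap]
  -- slice 1: ts[:n0]
  rw [PySem.List.slice_to_natCast]
  -- slice 3: ts[n0+n1:]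
  rw [hcast, PySem.List.slice_from_natCast]
  -- slice 2: ss[n0:n0+n1]
  have hss : (pvF0 ps ++ pvF1 ps ++ pvF2 ps).map Prod.snd
      = (pvF0 ps).map Prod.snd ++ (pvF1 ps).map Prod.snd ++ (pvF2 ps).map Prod.snd := by
    simp
  have hmid : PySem.List.slice ((pvF0 ps ++ pvF1 ps ++ pvF2 ps).map Prod.snd)
      (some ((pvF0 ps).length : Int)) (some (((pvF0 ps).length + (pvF1 ps).length : Nat) : Int))
      = (pvF1 ps).map Prod.snd := by
    have : (((pvF0 ps).length + (pvF1 ps).length : Nat) : Int)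
        = ((pvF0 ps).length : Int) + ((pvF1 ps).length : Nat) := by push_cast; ring
    rw [this, PySem.List.slice_natCast_add, hss, List.append_assoc,
        List.drop_left' (by simp), List.take_left' (by simp)]
  rw [hmid, hss]
  -- take/drop on the text side
  have ht1 : (m0 ++ m1 ++ m2).take (pvF0 ps).length = m0 := by
    rw [hl0, List.append_assoc]; exact List.take_left' rfl
  have ht2 : (m0 ++ m1 ++ m2).drop ((pvF0 ps).length + (pvF1 ps).length) = m2 := by
    rw [hl0, hl1]; exact List.drop_left' (by simp)
  rw [ht1, ht2]
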